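-- pv_equiv track=rewrite | github.com/shoark7/algorithm-with-python | etc_examples/str_rotation.py | rotate_divide
-- ===== SOURCE A (Python) =====
-- def rotate_divide(s, m):
--     if m <= 0 or not s:
--         return s
--     elif m >= len(s):
--         return rotate_divide(s, m % len(s))
--
--     s = [c for c in s]
--     def change(s, hs, ts, n):
--         tmp = ['' for _ in range(n)]
--         for i in range(n):
--             tmp[i] = s[hs+i]
--             s[hs+i] = s[ts+i]
--             s[ts+i] = tmp[i]
--
--     def rotate(lo, hi, m):
--         n = hi - lo + 1
--         if n % 2 == 0 and n // 2 == m: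
--             change(s, lo, lo+m, m)
--         elif m < n - m:
--             change(s, lo, hi-m+1, m)
--             rotate(lo, hi-m, m)
--         else:
--             m = n - m
--             change(s, lo, hi-m+1, m)
--             rotate(lo+m, hi, n-2 * m)
--
--     rotate(0, len(s)-1, m)
--     return ''.join(s)
-- ===== SOURCE B (Python) =====
-- def rotate_divide(s, m):
--     if m <= 0 or not s:
--         return s
--     k = m % len(s)
--     return s[k:] + s[:k]
-- ===== Notes on version B (the rewrite author's own statement) =====
-- stated objective: simpler
-- what changed: Replaces the recursive in-place block-swap (juggling) rotation with the closed-form slice s[k:]+s[:k] where k = m % len(s), keeping A's exact guards for m <= 0 and empty s.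
import Mathlib
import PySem

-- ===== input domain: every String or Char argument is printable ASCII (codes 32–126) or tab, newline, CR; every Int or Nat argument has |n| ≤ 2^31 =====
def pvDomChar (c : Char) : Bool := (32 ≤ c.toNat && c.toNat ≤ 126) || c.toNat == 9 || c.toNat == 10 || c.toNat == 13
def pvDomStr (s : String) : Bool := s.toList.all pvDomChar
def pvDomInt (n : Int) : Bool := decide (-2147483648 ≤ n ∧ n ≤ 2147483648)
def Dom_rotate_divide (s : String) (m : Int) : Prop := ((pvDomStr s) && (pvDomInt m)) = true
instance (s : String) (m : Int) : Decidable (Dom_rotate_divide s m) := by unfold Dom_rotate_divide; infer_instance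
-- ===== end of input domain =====

-- B replaces A's recursive in-place block-swap rotation by the closed-form slice s[k:] + s[:k], k = m % len(s) (objective: simpler).

-- ===== PORT A =====
-- helper `change(s, hs, ts, n)`: the Python loop `for i in range(n): tmp = s[hs+i]; s[hs+i] = s[ts+i]; s[ts+i] = tmp`,
-- as a fold over range n updating the list. All indices reached from `rotate_divide` are in range, where List.set/getD agree with Python's s[i].
def pvChange (s : List Char) (hs ts n : Nat) : List Char :=
  (List.range n).foldl (fun s i =>
    let tmp := s.getD (hs + i) ' '
    let s1 := s.set (hs + i) (s.getD (ts + i) ' ')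
    s1.set (ts + i) tmp) s

-- helper `rotate(lo, hi, m)`: the Python recursion, with an explicit fuel parameter as a totality guard
-- (the Python recursion always terminates because hi - lo strictly decreases; fuel = len(s) suffices).
-- All reachable arguments are nonnegative, so Nat arithmetic matches Python's int arithmetic here.
def pvRotate (fuel : Nat) (s : List Char) (lo hi m : Nat) : List Char :=
  match fuel with
  | 0 => s
  | fuel + 1 =>
    let n := hi + 1 - lo
    if n % 2 = 0 ∧ n / 2 = m then
      pvChange s lo (lo + m) m
    else if m < n - m then
      pvRotate fuel (pvChange s lo (hi - m + 1) m) lo (hi - m) m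
    else
      -- Python reassigns m := n - m and uses it thrice; inlined as (n - m)
      pvRotate fuel (pvChange s lo (hi - (n - m) + 1) (n - m)) (lo + (n - m)) hi (n - 2 * (n - m))

def rotate_divide (s : String) (m : Int) : String :=
  if m ≤ 0 ∨ s.toList = [] then s
  else if (s.toList.length : Int) ≤ m then
    rotate_divide s (PySem.Int.mod m (s.toList.length : Int))
  else
    String.ofList (pvRotate s.toList.length s.toList 0 (s.toList.length - 1) m.toNat)
termination_by m.toNat
decreasing_by
  rename_i h1 h2
  have hlen : 0 < s.toList.length := by
    have : s.toList ≠ [] := fun h => h1 (Or.inr h)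
    exact List.length_pos_iff.mpr this
  have hpos : (0 : Int) < (s.toList.length : Int) := by exact_mod_cast hlen
  have hlt := PySem.Int.mod_lt m hpos
  omega

-- ===== PORT B =====
def rotate_divide_alt (s : String) (m : Int) : String :=
  if m ≤ 0 ∨ s.toList = [] then s
  else
    let k := PySem.Int.mod m (s.toList.length : Int)
    String.ofList (PySem.List.slice s.toList (some k) none ++ PySem.List.slice s.toList none (some k))

-- ===== PRECONDITION & SPEC =====
def Spec_rotate_divide (s : String) (m : Int) (out : String) : Prop := out = rotate_divide_alt s m
instance (s : String) (m : Int) (out : String) : Decidable (Spec_rotate_divide s m out) := by unfold Spec_rotate_divide; infer_instance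

-- ===== CLAIM (what is proved, stated in full; the proofs are below) =====
def Claim_equal_rotate_divide : Prop := ∀ (s : String) (m : Int), Dom_rotate_divide s m → Spec_rotate_divide s m (rotate_divide s m)

-- ===== LEMMAS AND PROOFS =====

theorem pvGetD_prefix (A B : List Char) (c d : Char) (i : Nat) (h : i = A.length) :
    (A ++ c :: B).getD i d = c := by
  subst h; simp [List.getD]

theorem pvSet_prefix' (A B : List Char) (c v : Char) (i : Nat) (h : i = A.length) :
    (A ++ c :: B).set i v = A ++ v :: B := by
  subst h; simp

-- the change loop swaps two disjoint equal-length blocks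
theorem pvChange_swap : ∀ (n : Nat) (P X M Z Q : List Char),
    X.length = n → Z.length = n →
    pvChange (P ++ X ++ M ++ Z ++ Q) P.length (P.length + n + M.length) n
      = P ++ Z ++ M ++ X ++ Q := by
  intro n
  induction n with
  | zero =>
    intro P X M Z Q hX hZ
    rw [List.eq_nil_of_length_eq_zero hX, List.eq_nil_of_length_eq_zero hZ]
    simp [pvChange]
  | succ n ih =>
    intro P X M Z Q hX hZ
    rcases X.eq_nil_or_concat with rfl | ⟨X', x, rfl⟩
    · simp at hX
    rcases Z.eq_nil_or_concat with rfl | ⟨Z', z, rfl⟩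
    · simp at hZ
    simp only [List.concat_eq_append] at hX hZ ⊢
    have hX' : X'.length = n := by simpa using hX
    have hZ' : Z'.length = n := by simpa using hZ
    have hstep : ∀ (t : List Char) (hs ts : Nat),
        pvChange t hs ts (n + 1) =
          (let L := pvChange t hs ts n
           let s1 := L.set (hs + n) (L.getD (ts + n) ' ')
           s1.set (ts + n) (L.getD (hs + n) ' ')) := by
      intro t hs ts
      simp [pvChange, List.range_succ]
    rw [hstep]
    have hre : P ++ (X' ++ [x]) ++ M ++ (Z' ++ [z]) ++ Q
        = P ++ X' ++ ([x] ++ M) ++ Z' ++ ([z] ++ Q) := by simp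
    have hts : P.length + (n + 1) + M.length = P.length + n + ([x] ++ M).length := by
      simp; omega
    rw [hre, hts, ih P X' ([x] ++ M) Z' ([z] ++ Q) hX' hZ']
    have e1 : P ++ Z' ++ ([x] ++ M) ++ X' ++ ([z] ++ Q)
        = (P ++ Z') ++ x :: (M ++ X' ++ z :: Q) := by simp
    have e2 : P ++ Z' ++ ([x] ++ M) ++ X' ++ ([z] ++ Q)
        = (P ++ Z' ++ [x] ++ M ++ X') ++ z :: Q := by simp
    have e3 : (P ++ Z') ++ z :: (M ++ X' ++ z :: Q) = (P ++ Z' ++ [z] ++ M ++ X') ++ z :: Q := by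
      simp
    have g_hs : (P ++ Z' ++ ([x] ++ M) ++ X' ++ ([z] ++ Q)).getD (P.length + n) ' ' = x := by
      rw [e1]; exact pvGetD_prefix _ _ _ _ _ (by simp [hZ'])
    have g_ts : (P ++ Z' ++ ([x] ++ M) ++ X' ++ ([z] ++ Q)).getD
        (P.length + n + ([x] ++ M).length + n) ' ' = z := by
      rw [e2]; exact pvGetD_prefix _ _ _ _ _ (by simp [hZ', hX']; omega)
    have s_hs : (P ++ Z' ++ ([x] ++ M) ++ X' ++ ([z] ++ Q)).set (P.length + n) z
        = (P ++ Z') ++ z :: (M ++ X' ++ z :: Q) := by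
      rw [e1]; exact pvSet_prefix' _ _ _ _ _ (by simp [hZ'])
    have s_ts : ((P ++ Z') ++ z :: (M ++ X' ++ z :: Q)).set (P.length + n + ([x] ++ M).length + n) x
        = (P ++ Z' ++ [z] ++ M ++ X') ++ x :: Q := by
      rw [e3]; exact pvSet_prefix' _ _ _ _ _ (by simp [hZ', hX']; omega)
    simp only [g_ts, s_hs, g_hs, s_ts]
    simp

-- the rotate recursion left-rotates the segment [lo, hi] by m
theorem pvRotate_spec : ∀ (fuel : Nat) (P seg Q : List Char) (m : Nat),
    0 < m → m < seg.length → seg.length ≤ fuel →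
    pvRotate fuel (P ++ seg ++ Q) P.length (P.length + seg.length - 1) m
      = P ++ (seg.drop m ++ seg.take m) ++ Q := by
  intro fuel
  induction fuel with
  | zero => intro P seg Q m h0 hm hf; omega
  | succ f ih =>
    intro P seg Q m h0 hm hf
    have hsplit : ∀ (a b : Nat), a + b ≤ seg.length →
        ∃ X Y Z : List Char, seg = X ++ Y ++ Z ∧ X.length = a ∧ Y.length = b ∧
          Z.length = seg.length - a - b := by
      intro a b hab
      refine ⟨seg.take a, (seg.drop a).take b, seg.drop (a + b), ?_, ?_, ?_, ?_⟩
      · conv_lhs => rw [← List.take_append_drop (a + b) seg]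
        rw [List.take_add]
      · simp; omega
      · simp; omega
      · simp [Nat.sub_sub]
    rw [pvRotate]
    rw [show P.length + seg.length - 1 + 1 - P.length = seg.length by omega]
    split_ifs with hc1 hc2
    · -- n even and n // 2 = m : single swap
      have h2m : seg.length = 2 * m := by omega
      obtain ⟨X, Y, Z, hseg, hX, hY, hZ⟩ := hsplit m 0 (by omega)
      have hY0 : Y = [] := List.eq_nil_of_length_eq_zero hY
      subst hY0
      have hZ' : Z.length = m := by omega
      have := pvChange_swap m P X [] Z Q hX hZ'
      simp only [List.append_nil] at this hseg
      rw [hseg]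
      rw [show P.length + m = P.length + m + ([] : List Char).length by simp]
      have eArg : P ++ (X ++ Z) ++ Q = P ++ X ++ ([] : List Char) ++ Z ++ Q := by simp
      rw [eArg, pvChange_swap m P X [] Z Q hX hZ']
      simp [List.drop_left' hX, List.take_left' hX]
    · -- m < n - m
      obtain ⟨X, Y, Z, hseg, hX, hY, hZ⟩ := hsplit m (seg.length - 2 * m) (by omega)
      have hZ' : Z.length = m := by omega
      have hlen : seg.length = X.length + Y.length + Z.length := by
        rw [hseg]; simp; omega
      rw [show P.length + seg.length - 1 - m + 1 = P.length + m + Y.length by omega]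
      rw [hseg]
      have eArg : P ++ (X ++ Y ++ Z) ++ Q = P ++ X ++ Y ++ Z ++ Q := by simp
      rw [eArg, pvChange_swap m P X Y Z Q hX hZ']
      have eArg2 : P ++ Z ++ Y ++ X ++ Q = P ++ (Z ++ Y) ++ (X ++ Q) := by simp
      rw [eArg2]
      rw [show P.length + (X ++ Y ++ Z).length - 1 - m = P.length + (Z ++ Y).length - 1 by
            simp; omega]
      rw [ih P (Z ++ Y) (X ++ Q) m h0 (by simp; omega) (by simp; omega)]
      rw [List.drop_left' hZ', List.take_left' hZ']
      rw [show m = X.length from hX.symm, List.append_assoc X Y Z, List.drop_left, List.take_left]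
      simp
    · -- m > n - m : swap tail block of length n - m
      have h2m : seg.length < 2 * m := by
        by_cases h : seg.length = 2 * m
        · exact absurd ⟨by omega, by omega⟩ hc1
        · omega
      obtain ⟨X, Y, Z, hseg, hX, hY, hZ⟩ :=
        hsplit (seg.length - m) (seg.length - 2 * (seg.length - m)) (by omega)
      have hZ' : Z.length = seg.length - m := by omega
      have hlen : seg.length = X.length + Y.length + Z.length := by
        rw [hseg]; simp; omega
      rw [show P.length + seg.length - 1 - (seg.length - m) + 1
            = P.length + (seg.length - m) + Y.length by omega]
      rw [hseg]
      rw [show (X ++ Y ++ Z).length = seg.length from by rw [hseg]]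
      have eArg : P ++ (X ++ Y ++ Z) ++ Q = P ++ X ++ Y ++ Z ++ Q := by simp
      rw [eArg, pvChange_swap (seg.length - m) P X Y Z Q hX hZ']
      have eArg2 : P ++ Z ++ Y ++ X ++ Q = (P ++ Z) ++ (Y ++ X) ++ Q := by simp
      rw [eArg2]
      rw [show P.length + (seg.length - m) = (P ++ Z).length by simp; omega]
      rw [show P.length + seg.length - 1 = (P ++ Z).length + (Y ++ X).length - 1 by
            simp; omega]
      rw [ih (P ++ Z) (Y ++ X) Q (seg.length - 2 * (seg.length - m)) (by omega)
            (by simp; omega) (by simp; omega)]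
      rw [List.drop_left' hY, List.take_left' hY]
      rw [show m = (X ++ Y).length by simp; omega]
      rw [List.drop_left, List.take_left]
      simp

theorem rotate_divide_small (s : String) (m : Int) (h0 : 0 < m)
    (hlt : m < (s.toList.length : Int)) :
    rotate_divide s m = String.ofList (s.toList.drop m.toNat ++ s.toList.take m.toNat) := by
  have hlen : 0 < s.toList.length := by omega
  rw [rotate_divide, if_neg, if_neg (by omega)]
  · have key := pvRotate_spec s.toList.length [] s.toList [] m.toNat (by omega) (by omega)
      (le_refl _)
    simp only [List.nil_append, List.append_nil, List.length_nil, Nat.zero_add] at key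
    rw [key]
  · rintro (h | h)
    · omega
    · rw [h] at hlen; simp at hlen

theorem rotate_divide_alt_eval (s : String) (m : Int) (h0 : 0 < m) (hne : s.toList ≠ []) :
    rotate_divide_alt s m =
      String.ofList (s.toList.drop (PySem.Int.mod m (s.toList.length : Int)).toNat
        ++ s.toList.take (PySem.Int.mod m (s.toList.length : Int)).toNat) := by
  have hlen : 0 < s.toList.length := List.length_pos_iff.mpr hne
  have hpos : (0 : Int) < (s.toList.length : Int) := by exact_mod_cast hlen
  simp only [rotate_divide_alt]
  rw [if_neg (fun hc => hc.elim (fun h => absurd h (by omega)) (fun h => hne h))]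
  rw [PySem.List.slice_from _ (PySem.Int.mod_nonneg m hpos),
      PySem.List.slice_to _ (PySem.Int.mod_nonneg m hpos)]

-- ===== VERDICT (by name: the statement is the Claim_ definition above) =====
theorem rotate_divide_spec : Claim_equal_rotate_divide := by
  intro s m _
  unfold Spec_rotate_divide
  by_cases hg : m ≤ 0 ∨ s.toList = []
  · rw [rotate_divide, if_pos hg, rotate_divide_alt, if_pos hg]
  · rw [not_or] at hg
    obtain ⟨h0', hne⟩ := hg
    have h0 : 0 < m := by omega
    have hlen : 0 < s.toList.length := List.length_pos_iff.mpr hne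
    have hpos : (0 : Int) < (s.toList.length : Int) := by exact_mod_cast hlen
    have hg' : ¬(m ≤ 0 ∨ s.toList = []) := fun hc => hc.elim (fun h => absurd h h0') hne
    rw [rotate_divide_alt_eval s m (by omega) hne]
    by_cases hlt : m < (s.toList.length : Int)
    · rw [rotate_divide_small s m (by omega) hlt]
      rw [show PySem.Int.mod m (s.toList.length : Int) = m from by
            rw [PySem.Int.mod_eq_emod_of_pos hpos]; exact Int.emod_eq_of_lt (by omega) hlt]
    · rw [rotate_divide, if_neg hg', if_pos (by omega)]
      have hr0 : 0 ≤ PySem.Int.mod m (s.toList.length : Int) := PySem.Int.mod_nonneg m hpos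
      have hrlt : PySem.Int.mod m (s.toList.length : Int) < (s.toList.length : Int) :=
        PySem.Int.mod_lt m hpos
      by_cases hz : PySem.Int.mod m (s.toList.length : Int) = 0
      · rw [hz]
        rw [rotate_divide, if_pos (Or.inl (le_refl 0))]
        simp [String.ofList_toList]
      · rw [rotate_divide_small s _ (by omega) hrlt]
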